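-- pv_equiv track=rewrite | github.com/sfffaaa/simple-ci-poc | tools/src/docker_logs.py | _compose_partial_container_name
-- ===== SOURCE A (Python) =====
-- PEAQ_PARACHAIN_IDS = [2000, 2241, 3338, 3013]
--
-- def _compose_partial_container_name(container_names, node_type, target):
--     # yoyo-relaychain-charlie, yoyo-parachain-2241-1, yoyo-parachain-3000-0
--     if node_type == 'relay':
--         data = [name for name in container_names if '-relaychain-alice-' in name]
--         if len(data) > 0:
--             return data[0]
--         else:
--             raise ValueError(f'No relaychain container found in {container_names}')
--     elif node_type == 'peaq':
--         partial_names = [f'-parachain-{s}-{target}' for s in PEAQ_PARACHAIN_IDS]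
--         data = [name for name in container_names if any([f in name for f in partial_names])]
--         if len(data) > 0:
--             return data[0]
--         raise ValueError(f'No parachain container found in {container_names}')
--     elif node_type == '3rd':
--         filter_name = ['-relaychain-'] + [f'-parachain-{s}-' for s in PEAQ_PARACHAIN_IDS]
--         data = [name for name in container_names if not any([f in name for f in filter_name])]
--         if len(data) > 0:
--             return data[0]
--         else:
--             raise ValueError(f'No 3rd party container found in {container_names}')
--     else:
--         raise ValueError(f'Unknown node type {node_type}')
-- ===== SOURCE B (Python) =====
-- PEAQ_PARACHAIN_IDS = [2000, 2241, 3338, 3013]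
--
-- _ERRORS = {'relay': 'No relaychain container found in',
--            'peaq': 'No parachain container found in',
--            '3rd': 'No 3rd party container found in'}
--
-- def _compose_partial_container_name(container_names, node_type, target):
--     if node_type not in _ERRORS:
--         raise ValueError(f'Unknown node type {node_type}')
--     peaq_tags = [f'-parachain-{s}-{target}' for s in PEAQ_PARACHAIN_IDS]
--     third_tags = ['-relaychain-'] + [f'-parachain-{s}-' for s in PEAQ_PARACHAIN_IDS]
--     # One pass: classify every name into its categories, remembering the first
--     # container per category; then answer the query by a plain lookup.
--     first = {}
--     for name in container_names:
--         if '-relaychain-alice-' in name: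
--             first.setdefault('relay', name)
--         if any(t in name for t in peaq_tags):
--             first.setdefault('peaq', name)
--         if not any(t in name for t in third_tags):
--             first.setdefault('3rd', name)
--     if node_type in first:
--         return first[node_type]
--     raise ValueError(f'{_ERRORS[node_type]} {container_names}')
-- ===== Notes on version B (the rewrite author's own statement) =====
-- stated objective: alternative
-- what changed: Instead of A's three node_type branches each filtering the list for its own pattern, B validates node_type, then makes one classification pass that builds an index dict mapping every category (relay/peaq/3rd) to its first matching container, and answers by a pure dict lookup.
import Mathlib
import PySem

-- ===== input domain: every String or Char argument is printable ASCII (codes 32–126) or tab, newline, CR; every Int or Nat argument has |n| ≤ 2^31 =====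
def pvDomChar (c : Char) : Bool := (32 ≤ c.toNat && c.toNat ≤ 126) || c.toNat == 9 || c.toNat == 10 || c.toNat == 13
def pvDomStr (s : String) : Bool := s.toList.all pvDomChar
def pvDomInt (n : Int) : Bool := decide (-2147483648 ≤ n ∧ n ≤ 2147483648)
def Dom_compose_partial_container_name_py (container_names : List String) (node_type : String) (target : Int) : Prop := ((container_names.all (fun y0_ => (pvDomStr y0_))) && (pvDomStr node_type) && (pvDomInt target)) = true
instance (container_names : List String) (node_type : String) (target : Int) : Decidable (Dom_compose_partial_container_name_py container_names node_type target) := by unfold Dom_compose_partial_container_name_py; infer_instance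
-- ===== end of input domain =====

-- B replaces A's three per-branch filter-then-index passes with one classification
-- pass that indexes the first matching container per category, then a pure lookup.
-- Pre_ excludes exactly the inputs where the Python A raises ValueError (unknown
-- node_type, or no container matches the branch's pattern); B raises the same errors there.

-- the substring patterns of the three categories (shared constants of A and B)
def pvRelayP (name : String) : Bool := PySem.Str.isIn "-relaychain-alice-" name
def pvPeaqNames (target : Int) : List String :=
  [(2000 : Int), 2241, 3338, 3013].map
    (fun s => "-parachain-" ++ PySem.Int.toStr s ++ "-" ++ PySem.Int.toStr target)
def pvPeaqP (target : Int) (name : String) : Bool :=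
  (pvPeaqNames target).any (fun f => PySem.Str.isIn f name)
def pvThirdNames : List String :=
  "-relaychain-" :: [(2000 : Int), 2241, 3338, 3013].map
    (fun s => "-parachain-" ++ PySem.Int.toStr s ++ "-")
def pvThirdP (name : String) : Bool :=
  !(pvThirdNames.any (fun f => PySem.Str.isIn f name))

-- ===== PORT A =====
-- three branches, each: filter the whole list, then data[0] if non-empty
-- (the `""` arms are Python's ValueError raises, excluded by Pre_)
def compose_partial_container_name_py (container_names : List String) (node_type : String) (target : Int) : String :=
  if node_type = "relay" then
    match container_names.filter pvRelayP with
    | d :: _ => d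
    | [] => ""
  else if node_type = "peaq" then
    match container_names.filter (pvPeaqP target) with
    | d :: _ => d
    | [] => ""
  else if node_type = "3rd" then
    match container_names.filter pvThirdP with
    | d :: _ => d
    | [] => ""
  else ""

-- ===== PORT B =====
-- one loop body: setdefault each category the name falls into
def pvIndexStep (target : Int) (d : PySem.Dict String String) (name : String) : PySem.Dict String String :=
  let d := if pvRelayP name then PySem.Dict.setdefault d "relay" name else d
  let d := if pvPeaqP target name then PySem.Dict.setdefault d "peaq" name else d
  if pvThirdP name then PySem.Dict.setdefault d "3rd" name else d

-- validate node_type, build the first-match-per-category index, then look up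
-- (the `""` arms are B's ValueError raises, excluded by Pre_)
def compose_partial_container_name_py_alt (container_names : List String) (node_type : String) (target : Int) : String :=
  if node_type = "relay" ∨ node_type = "peaq" ∨ node_type = "3rd" then
    match (container_names.foldl (pvIndexStep target) PySem.Dict.empty).get? node_type with
    | some v => v
    | none => ""
  else ""

-- ===== PRECONDITION & SPEC =====
-- exactly the inputs where the Python A returns: a known node_type with at least one matching name
def Pre_compose_partial_container_name_py (container_names : List String) (node_type : String) (target : Int) : Prop :=
  (node_type = "relay" ∧ container_names.any pvRelayP = true) ∨
  (node_type = "peaq" ∧ container_names.any (pvPeaqP target) = true) ∨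
  (node_type = "3rd" ∧ container_names.any pvThirdP = true)
instance (container_names : List String) (node_type : String) (target : Int) : Decidable (Pre_compose_partial_container_name_py container_names node_type target) := by unfold Pre_compose_partial_container_name_py; infer_instance

def pvWitness_compose_partial_container_name_py : List String × String × Int :=
  (["yoyo-relaychain-alice-0", "yoyo-parachain-2241-1"], "relay", 1)

def Spec_compose_partial_container_name_py (container_names : List String) (node_type : String) (target : Int) (out : String) : Prop := out = compose_partial_container_name_py_alt container_names node_type target
instance (container_names : List String) (node_type : String) (target : Int) (out : String) : Decidable (Spec_compose_partial_container_name_py container_names node_type target out) := by unfold Spec_compose_partial_container_name_py; infer_instance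

-- ===== CLAIM (what is proved, stated in full; the proofs are below) =====
def Claim_equal_compose_partial_container_name_py : Prop := ∀ (container_names : List String) (node_type : String) (target : Int), Dom_compose_partial_container_name_py container_names node_type target → Pre_compose_partial_container_name_py container_names node_type target → Spec_compose_partial_container_name_py container_names node_type target (compose_partial_container_name_py container_names node_type target)

-- ===== LEMMAS AND PROOFS =====

-- head of a filtered list = first match
theorem head_filter_eq_findD (l : List String) (p : String → Bool) :
    (match l.filter p with | d :: _ => d | [] => "") = (l.find? p).getD "" := by
  induction l with
  | nil => rfl
  | cons a t ih =>
    by_cases h : p a = true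
    · simp [h]
    · simp [h, ih]

-- effect of one classification step on each category's slot
theorem get?_indexStep_relay (t : Int) (d : PySem.Dict String String) (n : String) :
    (pvIndexStep t d n).get? "relay"
      = if pvRelayP n then some ((d.get? "relay").getD n) else d.get? "relay" := by
  unfold pvIndexStep
  by_cases h1 : pvRelayP n = true <;> by_cases h2 : pvPeaqP t n = true <;>
    by_cases h3 : pvThirdP n = true <;>
    simp [h1, h2, h3, PySem.Dict.get?_setdefault_self, PySem.Dict.get?_setdefault_of_ne]

theorem get?_indexStep_peaq (t : Int) (d : PySem.Dict String String) (n : String) :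
    (pvIndexStep t d n).get? "peaq"
      = if pvPeaqP t n then some ((d.get? "peaq").getD n) else d.get? "peaq" := by
  unfold pvIndexStep
  by_cases h1 : pvRelayP n = true <;> by_cases h2 : pvPeaqP t n = true <;>
    by_cases h3 : pvThirdP n = true <;>
    simp [h1, h2, h3, PySem.Dict.get?_setdefault_self, PySem.Dict.get?_setdefault_of_ne]

theorem get?_indexStep_third (t : Int) (d : PySem.Dict String String) (n : String) :
    (pvIndexStep t d n).get? "3rd"
      = if pvThirdP n then some ((d.get? "3rd").getD n) else d.get? "3rd" := by
  unfold pvIndexStep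
  by_cases h1 : pvRelayP n = true <;> by_cases h2 : pvPeaqP t n = true <;>
    by_cases h3 : pvThirdP n = true <;>
    simp [h1, h2, h3, PySem.Dict.get?_setdefault_self, PySem.Dict.get?_setdefault_of_ne]

-- the index fold's slot for a category = the first name satisfying its predicate
theorem get?_foldl_index (t : Int) (cs : List String) (d : PySem.Dict String String)
    (k : String) (p : String → Bool)
    (hstep : ∀ (d : PySem.Dict String String) (n : String),
      (pvIndexStep t d n).get? k = if p n then some ((d.get? k).getD n) else d.get? k) :
    (cs.foldl (pvIndexStep t) d).get? k
      = match d.get? k with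
        | some v => some v
        | none => cs.find? p := by
  induction cs generalizing d with
  | nil => cases h : d.get? k <;> simp [h]
  | cons a tl ih =>
    simp only [List.foldl_cons]
    rw [ih, hstep]
    by_cases h : p a = true
    · cases hd : d.get? k <;> simp [h]
    · cases hd : d.get? k <;> simp [h]

-- ===== VERDICT (by name: the statement is the Claim_ definition above) =====
theorem compose_partial_container_name_py_spec : Claim_equal_compose_partial_container_name_py := by
  intro cs nt t _ hpre
  unfold Spec_compose_partial_container_name_py
  unfold compose_partial_container_name_py compose_partial_container_name_py_alt
  rcases hpre with ⟨hnt, _⟩ | ⟨hnt, _⟩ | ⟨hnt, _⟩ <;> subst hnt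
  · rw [get?_foldl_index t cs _ "relay" pvRelayP (get?_indexStep_relay t)]
    simp [head_filter_eq_findD, PySem.Dict.get?_empty]
    cases h : cs.find? pvRelayP <;> simp
  · rw [get?_foldl_index t cs _ "peaq" (pvPeaqP t) (get?_indexStep_peaq t)]
    simp [head_filter_eq_findD, PySem.Dict.get?_empty]
    cases h : cs.find? (pvPeaqP t) <;> simp
  · rw [get?_foldl_index t cs _ "3rd" pvThirdP (get?_indexStep_third t)]
    simp [head_filter_eq_findD, PySem.Dict.get?_empty]
    cases h : cs.find? pvThirdP <;> simp
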